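-- pv_equiv track=rewrite | github.com/BrianF-2021/weather_proj | my_app/apis/wx_gov_2day_history.py | get_clean_string
-- ===== SOURCE A (Python) =====
-- def get_clean_string(the_string):
-- 	if the_string == "":
-- 		return
-- 	cleaned_string = ""
-- 	specials= ["\n", "\r", "\t", "\\"]
-- 	white_space_counter = 0
-- 	for index, char in enumerate(the_string):
-- 		if char != " " and char not in specials:
-- 			white_space_counter = 0
-- 			cleaned_string +=  char
-- 		if (char == " ") and (white_space_counter == 0) and (index != len(the_string)-1) and (len(cleaned_string) != 0):
-- 			white_space_counter += 1
-- 			cleaned_string += char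
-- 	if cleaned_string[-1] == " ":
-- 		cleaned_string = cleaned_string[:-1]
-- 	return cleaned_string
-- ===== SOURCE B (Python) =====
-- def get_clean_string(the_string):
--     if the_string == "":
--         return
--     kept = ''.join(c for c in the_string if c not in '\n\r\t\\')
--     return ' '.join(kept.split())
-- ===== Notes on version B (the rewrite author's own statement) =====
-- stated objective: idiomatic
-- what changed: A's indexed per-character loop with a whitespace counter and a final trailing-space trim is replaced by deleting the special characters with a filter and collapsing/stripping the spaces with split()/join(' '), moving the work into C-level str methods.
-- outside the precondition, e.g. on get_clean_string(' '): A raises IndexError, B returns ''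
import Mathlib
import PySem

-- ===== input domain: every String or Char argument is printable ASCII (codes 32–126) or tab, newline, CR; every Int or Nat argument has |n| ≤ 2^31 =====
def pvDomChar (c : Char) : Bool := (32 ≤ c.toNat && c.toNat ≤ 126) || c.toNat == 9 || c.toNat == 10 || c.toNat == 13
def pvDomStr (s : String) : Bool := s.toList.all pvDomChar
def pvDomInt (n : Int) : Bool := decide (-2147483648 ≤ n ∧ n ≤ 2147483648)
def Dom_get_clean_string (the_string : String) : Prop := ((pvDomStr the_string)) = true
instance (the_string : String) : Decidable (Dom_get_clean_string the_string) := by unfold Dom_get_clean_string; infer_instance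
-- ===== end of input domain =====

-- B replaces A's indexed per-character loop (whitespace counter, trailing-space trim) by deleting
-- the special characters and collapsing/stripping spaces with split()/join(' '); idiomatic, and the
-- timing run measured it faster by a constant factor (C-level str methods vs the Python loop).
-- ===== PORT A =====
-- loop body of A's `for index, char in enumerate(the_string)`; n = len(the_string)
def stepA (n : Int) (st : List Char × Int) (p : Int × Char) : List Char × Int :=
  -- if char != " " and char not in specials: white_space_counter = 0; cleaned_string += char
  let st1 := if p.2 ≠ ' ' ∧ p.2 ∉ ['\n', '\r', '\t', '\\'] then (st.1 ++ [p.2], 0) else st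
  -- if (char == " ") and (white_space_counter == 0) and (index != len-1) and (len(cleaned) != 0):
  if p.2 = ' ' ∧ st1.2 = 0 ∧ p.1 ≠ n - 1 ∧ st1.1.length ≠ 0 then (st1.1 ++ [p.2], st1.2 + 1)
  else st1

-- final value of (cleaned_string, white_space_counter) after A's loop
def loopA (the_string : String) : List Char × Int :=
  (PySem.List.enumerate the_string.toList).foldl (stepA (the_string.toList.length : Int)) ([], 0)

def get_clean_string (the_string : String) : Option String :=
  if the_string == "" then none
  else
    match PySem.List.pyGet? (loopA the_string).1 (-1) with
    | none => none  -- Python raises IndexError on cleaned_string[-1] here (excluded by Pre_)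
    | some c =>
      some (String.ofList (if c = ' ' then PySem.List.slice (loopA the_string).1 none (some (-1))
                           else (loopA the_string).1))

-- ===== PORT B =====
-- ''.join(c for c in the_string if c not in '\n\r\t\\'): exact as a filter over code points
def keptB (the_string : String) : String :=
  String.ofList (the_string.toList.filter (fun c => !(['\n', '\r', '\t', '\\'].contains c)))

def get_clean_string_alt (the_string : String) : Option String :=
  if the_string == "" then none
  else some (PySem.Str.join " " (PySem.Str.split₀ (keptB the_string)))

-- ===== PRECONDITION & SPEC =====
-- Pre_ excludes exactly the nonempty strings containing only spaces and specials: there A's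
-- cleaned string stays empty and cleaned_string[-1] raises IndexError.
def Pre_get_clean_string (the_string : String) : Prop :=
  the_string = "" ∨ the_string.toList.any (fun c => !(c == ' ') && !(['\n', '\r', '\t', '\\'].contains c)) = true
instance (the_string : String) : Decidable (Pre_get_clean_string the_string) := by
  unfold Pre_get_clean_string; infer_instance
def pvWitness_get_clean_string : String := "a  b "

def Spec_get_clean_string (the_string : String) (out : Option String) : Prop :=
  out = get_clean_string_alt the_string
instance (the_string : String) (out : Option String) : Decidable (Spec_get_clean_string the_string out) := by
  unfold Spec_get_clean_string; infer_instance


-- ===== CLAIM (what is proved, stated in full; the proofs are below) =====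
def Claim_equal_get_clean_string : Prop := ∀ (the_string : String), Dom_get_clean_string the_string → Pre_get_clean_string the_string → Spec_get_clean_string the_string (get_clean_string the_string)

-- ===== LEMMAS AND PROOFS =====

-- `c` is a regular character: neither the space being collapsed nor a deleted special.
def regC (c : Char) : Bool := !(c == ' ' || ['\n', '\r', '\t', '\\'].contains c)

-- Cleaned text produced by A's loop from the suffix `l`, given the in-word flag (w = false covers
-- both "cleaned still empty" and "space just appended"); the `r ≠ []` guard is A's `index != len-1`.
def hh (w : Bool) : List Char → List Char
  | [] => []
  | c :: r =>
    if regC c then c :: hh true r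
    else if w ∧ c = ' ' ∧ r ≠ [] then ' ' :: hh false r
    else hh w r

-- Eager variant: appends the collapsing space even when nothing follows.
def ee (w : Bool) : List Char → List Char
  | [] => []
  | c :: r =>
    if regC c then c :: ee true r
    else if w ∧ c = ' ' then ' ' :: ee false r
    else ee w r

-- Lazy variant: a collapsing space is emitted only if another word follows.
def gg (w : Bool) : List Char → List Char
  | [] => []
  | c :: r =>
    if regC c then c :: gg true r
    else if w ∧ c = ' ' then (match gg false r with | [] => [] | x => ' ' :: x)
    else gg w r

-- `PySem.Chars.split₀.go` without its accumulator.
def Wd (cur : List Char) : List Char → List (List Char)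
  | [] => if cur.isEmpty then [] else [cur.reverse]
  | c :: r =>
    if PySem.Chars.isspace c then (if cur.isEmpty then Wd [] r else cur.reverse :: Wd [] r)
    else Wd (c :: cur) r

def trimEnd (m : List Char) : List Char := if m.getLast? = some ' ' then m.dropLast else m

lemma invA (n : Int) (l : List Char) (k : Int) (h : k + l.length = n) :
    (∀ cl, ((PySem.List.enumerate l k).foldl (stepA n) (cl, 1)).1 = cl ++ hh false l) ∧
    (∀ cl, cl ≠ [] → ((PySem.List.enumerate l k).foldl (stepA n) (cl, 0)).1 = cl ++ hh true l) ∧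
    ((PySem.List.enumerate l k).foldl (stepA n) ([], 0)).1 = hh false l := by
  induction l generalizing k with
  | nil => simp [PySem.List.enumerate, hh]
  | cons c r ih =>
    have hlen : k + 1 + (r.length : Int) = n := by simp at h; omega
    obtain ⟨ih1, ih2, ih3⟩ := ih (k + 1) hlen
    by_cases hc : c = ' '
    · -- space character
      subst hc
      have hreg : regC ' ' = false := by decide
      refine ⟨?_, ?_, ?_⟩
      · intro cl
        rw [PySem.List.enumerate_cons, List.foldl_cons]
        have : stepA n (cl, 1) (k, ' ') = (cl, 1) := by simp [stepA]
        rw [this, ih1, hh]; simp [hreg]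
      · intro cl hcl
        rw [PySem.List.enumerate_cons, List.foldl_cons]
        by_cases hk : k = n - 1
        · have hr : r = [] := by
            have : (r.length : Int) = 0 := by omega
            simpa using this
          subst hr
          have : stepA n (cl, 0) (k, ' ') = (cl, 0) := by simp [stepA, hk]
          rw [this]
          simp [PySem.List.enumerate, hh, hreg]
        · have hr : r ≠ [] := by
            intro hr; subst hr; simp at hlen; omega
          have : stepA n (cl, 0) (k, ' ') = (cl ++ [' '], 1) := by
            simp [stepA, hk, hcl, List.length_eq_zero_iff]
          rw [this, ih1, hh]
          simp [hreg, hr]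
      · rw [PySem.List.enumerate_cons, List.foldl_cons]
        have : stepA n (([] : List Char), 0) (k, ' ') = ([], 0) := by simp [stepA]
        rw [this, ih3, hh]; simp [hreg]
    · by_cases hs : c ∈ ['\n', '\r', '\t', '\\']
      · -- special character
        have hreg : regC c = false := by
          simp only [List.mem_cons, List.not_mem_nil, or_false] at hs
          rcases hs with h|h|h|h <;> subst h <;> decide
        have hst : ∀ st, stepA n st (k, c) = st := by
          intro st; simp [stepA, hc, hs]
        refine ⟨?_, ?_, ?_⟩
        · intro cl
          rw [PySem.List.enumerate_cons, List.foldl_cons, hst, ih1, hh]; simp [hreg, hc]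
        · intro cl hcl
          rw [PySem.List.enumerate_cons, List.foldl_cons, hst, ih2 cl hcl, hh]; simp [hreg, hc]
        · rw [PySem.List.enumerate_cons, List.foldl_cons, hst, ih3, hh]; simp [hreg, hc]
      · -- regular character
        have hreg : regC c = true := by
          simp [regC, hc]; simpa using hs
        have hst : ∀ cl w, stepA n (cl, w) (k, c) = (cl ++ [c], 0) := by
          intro cl w; simp [stepA, hc, hs]
        refine ⟨?_, ?_, ?_⟩
        · intro cl
          rw [PySem.List.enumerate_cons, List.foldl_cons, hst, ih2 _ (by simp), hh]
          simp [hreg]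
        · intro cl _
          rw [PySem.List.enumerate_cons, List.foldl_cons, hst, ih2 _ (by simp), hh]
          simp [hreg]
        · rw [PySem.List.enumerate_cons, List.foldl_cons, hst, ih2 _ (by simp), hh]
          simp [hreg]


lemma hh_ne_nil (w : Bool) (l : List Char) (h : ∃ c ∈ l, regC c = true) : hh w l ≠ [] := by
  induction l generalizing w with
  | nil => simp at h
  | cons c r ih =>
    by_cases hc : regC c = true
    · simp [hh, hc]
    · obtain ⟨d, hd, hdr⟩ := h
      rcases List.mem_cons.mp hd with hd | hd
      · subst hd; exact absurd hdr hc
      · rw [hh]; simp only [hc]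
        by_cases hw2 : w = true ∧ c = ' ' ∧ r ≠ []
        · simp [hw2]
        · simp only [hw2, if_false]
          exact ih _ ⟨d, hd, hdr⟩

lemma ee_head (l : List Char) : ee false l = [] ∨ ∃ c t, ee false l = c :: t ∧ regC c = true := by
  induction l with
  | nil => left; rfl
  | cons c r ih =>
    rw [ee]
    by_cases hc : regC c = true
    · right; exact ⟨c, ee true r, by simp [hc], hc⟩
    · simpa [hc] using ih

lemma ee_hh (w : Bool) (l : List Char) :
    ee w l = hh w l ∨ (ee w l = hh w l ++ [' '] ∧ (hh w l).getLast? ≠ some ' ') := by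
  induction l generalizing w with
  | nil => left; rfl
  | cons c r ih =>
    by_cases hc : regC c = true
    · have eL : ee w (c :: r) = c :: ee true r := by rw [ee]; simp [hc]
      have eR : hh w (c :: r) = c :: hh true r := by rw [hh]; simp [hc]
      rw [eL, eR]
      rcases ih true with h | ⟨h, h2⟩
      · left; rw [h]
      · right
        refine ⟨by simp [h], ?_⟩
        cases hr : hh true r with
        | nil =>
          simp only [List.getLast?_singleton]
          intro habs
          rw [Option.some_inj] at habs
          rw [habs] at hc; exact absurd hc (by decide)
        | cons x t =>
          rw [hr] at h2
          rw [List.getLast?_cons_cons]; exact h2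
    · by_cases hw : w = true
      · subst hw
        by_cases hsp : c = ' '
        · subst hsp
          have eL : ee true (' ' :: r) = ' ' :: ee false r := by rw [ee]; simp [hc]
          by_cases hrne : r = []
          · subst hrne
            have eR : hh true [' '] = [] := by simp [hh, hc]
            rw [eL, eR]
            right; exact ⟨by simp [ee], by simp⟩
          · have eR : hh true (' ' :: r) = ' ' :: hh false r := by
              rw [hh]; simp [hc, hrne]
            rw [eL, eR]
            rcases ih false with h | ⟨h, h2⟩
            · left; rw [h]
            · right
              refine ⟨by simp [h], ?_⟩
              have hne : hh false r ≠ [] := by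
                intro habs
                rw [habs] at h; simp at h
                rcases ee_head r with he | ⟨d, u, he, hd⟩
                · rw [he] at h; simp at h
                · rw [he] at h; simp at h
                  rw [h.1] at hd; exact absurd hd (by decide)
              cases hr : hh false r with
              | nil => exact absurd hr hne
              | cons x t =>
                rw [hr] at h2
                rw [List.getLast?_cons_cons]; exact h2
        · have eL : ee true (c :: r) = ee true r := by rw [ee]; simp [hc, hsp]
          have eR : hh true (c :: r) = hh true r := by rw [hh]; simp [hc, hsp]
          rw [eL, eR]; exact ih true
      · have hw' : w = false := by cases w; rfl; exact absurd rfl hw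
        subst hw'
        have eL : ee false (c :: r) = ee false r := by rw [ee]; simp [hc]
        have eR : hh false (c :: r) = hh false r := by rw [hh]; simp [hc]
        rw [eL, eR]; exact ih false

lemma trimEnd_cons (c : Char) (x : List Char) :
    trimEnd (c :: x) = if x = [] then (if c = ' ' then [] else [c]) else c :: trimEnd x := by
  cases x with
  | nil => by_cases hc : c = ' ' <;> simp [trimEnd, hc]
  | cons a b =>
    simp only [trimEnd, List.getLast?_cons_cons, List.dropLast_cons₂]
    split <;> simp

lemma trimEnd_hh_ee (l : List Char) : trimEnd (hh false l) = trimEnd (ee false l) := by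
  rcases ee_hh false l with h | ⟨h, h2⟩
  · rw [h]
  · rw [h]
    have hlast : (hh false l ++ [' ']).getLast? = some ' ' := by simp
    rw [trimEnd, if_neg h2]
    conv_rhs => rw [trimEnd, if_pos hlast, List.dropLast_concat]

lemma ee_filter (w : Bool) (l : List Char) :
    ee w (l.filter (fun c => !(['\n', '\r', '\t', '\\'].contains c))) = ee w l := by
  induction l generalizing w with
  | nil => rfl
  | cons c r ih =>
    by_cases hs : c ∈ ['\n', '\r', '\t', '\\']
    · have hmem : c = '\n' ∨ c = '\r' ∨ c = '\t' ∨ c = '\\' := by simpa using hs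
      have hreg : regC c = false := by rcases hmem with h|h|h|h <;> subst h <;> decide
      have hsp : c ≠ ' ' := by rcases hmem with h|h|h|h <;> subst h <;> decide
      have hpred : (!(['\n', '\r', '\t', '\\'].contains c)) = false := by
        rcases hmem with h|h|h|h <;> subst h <;> decide
      have hee : ee w (c :: r) = ee w r := by rw [ee]; simp [hreg, hsp]
      rw [List.filter_cons_of_neg (by simp only [hpred]; decide), hee]; exact ih w
    · have hpred : (!(['\n', '\r', '\t', '\\'].contains c)) = true := by
        cases hb : ['\n', '\r', '\t', '\\'].contains c
        · rfl
        · exact absurd (by simpa using hb) hs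
      simp only [List.filter_cons, hpred, if_true]
      simp only [ee]
      simp only [ih]

lemma trimEnd_ee (w : Bool) (m : List Char) : trimEnd (ee w m) = gg w m := by
  induction m generalizing w with
  | nil => rfl
  | cons c r ih =>
    by_cases hc : regC c = true
    · have eL : ee w (c :: r) = c :: ee true r := by rw [ee]; simp [hc]
      have eR : gg w (c :: r) = c :: gg true r := by rw [gg]; simp [hc]
      rw [eL, eR, trimEnd_cons]
      have hcs : c ≠ ' ' := by intro h; rw [h] at hc; exact absurd hc (by decide)
      by_cases he : ee true r = []
      · rw [if_pos he, if_neg hcs, ← ih true, he]; rfl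
      · rw [if_neg he, ih true]
    · by_cases hw : w = true ∧ c = ' '
      · obtain ⟨hw1, hw2⟩ := hw; subst hw1; subst hw2
        have eL : ee true (' ' :: r) = ' ' :: ee false r := by rw [ee]; simp [hc]
        have eR : gg true (' ' :: r) = (match gg false r with | [] => [] | x => ' ' :: x) := by
          rw [gg]; simp [hc]
        rw [eL, eR, trimEnd_cons]
        by_cases he : ee false r = []
        · rw [if_pos he, if_pos rfl, ← ih false, he]; rfl
        · rw [if_neg he, ih false]
          rcases ee_head r with h0 | ⟨d, u, h0, hd⟩
          · exact absurd h0 he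
          · have hgg : gg false r ≠ [] := by
              rw [← ih false, h0, trimEnd_cons]
              have hds : d ≠ ' ' := by intro h; rw [h] at hd; exact absurd hd (by decide)
              by_cases hu : u = []
              · rw [if_pos hu, if_neg hds]; simp
              · rw [if_neg hu]; simp
            cases hg : gg false r with
            | nil => exact absurd hg hgg
            | cons a b => rfl
      · have eL : ee w (c :: r) = ee w r := by
          rw [ee, if_neg hc, if_neg hw]
        have eR : gg w (c :: r) = gg w r := by
          rw [gg, if_neg hc, if_neg hw]
        rw [eL, eR]; exact ih w

lemma split₀_go_eq_Wd (m : List Char) : ∀ cur acc,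
    PySem.Chars.split₀.go m cur acc = acc.reverse ++ Wd cur m := by
  induction m with
  | nil =>
    intro cur acc
    rw [PySem.Chars.split₀.go, Wd]
    by_cases hcur : cur.isEmpty
    · simp [hcur]
    · simp [hcur]
  | cons c r ih =>
    intro cur acc
    rw [PySem.Chars.split₀.go, Wd]
    by_cases hsp : PySem.Chars.isspace c
    · by_cases hcur : cur.isEmpty
      · simp only [hsp, hcur, if_true]
        exact ih [] acc
      · simp only [hsp, hcur, if_true, if_false, Bool.false_eq_true]
        rw [ih [] (cur.reverse :: acc)]
        simp
    · simp only [hsp, Bool.false_eq_true, if_false]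
      exact ih (c :: cur) acc

lemma Wd_mem_ne_nil (m : List Char) : ∀ cur x, x ∈ Wd cur m → x ≠ [] := by
  induction m with
  | nil =>
    intro cur x hx
    rw [Wd] at hx
    by_cases hcur : cur.isEmpty
    · simp [hcur] at hx
    · simp only [hcur, Bool.false_eq_true, if_false, List.mem_singleton] at hx
      subst hx
      simpa [List.isEmpty_iff] using hcur
  | cons c r ih =>
    intro cur x hx
    rw [Wd] at hx
    by_cases hsp : PySem.Chars.isspace c
    · by_cases hcur : cur.isEmpty
      · simp only [hsp, hcur, if_true] at hx
        exact ih [] x hx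
      · simp only [hsp, hcur, if_true, Bool.false_eq_true, if_false, List.mem_cons] at hx
        rcases hx with hx | hx
        · subst hx; simpa [List.isEmpty_iff] using hcur
        · exact ih [] x hx
    · simp only [hsp, Bool.false_eq_true, if_false] at hx
      exact ih (c :: cur) x hx

lemma join_Wd (m : List Char)
    (hm : ∀ c ∈ m, (PySem.Chars.isspace c = (c == ' ')) ∧ (regC c = !(c == ' '))) :
    PySem.Chars.join [' '] (Wd [] m) = gg false m ∧
    ∀ cur, cur ≠ [] → PySem.Chars.join [' '] (Wd cur m) = cur.reverse ++ gg true m := by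
  induction m with
  | nil =>
    constructor
    · simp [Wd, PySem.Chars.join_nil, gg]
    · intro cur hcur
      have : cur.isEmpty = false := by simpa [List.isEmpty_iff] using hcur
      rw [Wd]
      simp only [this, Bool.false_eq_true, if_false]
      rw [PySem.Chars.join_singleton, gg]
      simp
  | cons c r ih =>
    have hc := hm c (by simp)
    have hr : ∀ c ∈ r, (PySem.Chars.isspace c = (c == ' ')) ∧ (regC c = !(c == ' ')) := by
      intro d hd; exact hm d (List.mem_cons_of_mem _ hd)
    obtain ⟨ih1, ih2⟩ := ih hr
    by_cases hsp : c = ' '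
    · subst hsp
      have hspb : PySem.Chars.isspace ' ' = true := by rw [hc.1]; rfl
      have hrg : regC ' ' = false := by decide
      constructor
      · rw [Wd]
        simp only [hspb, if_true, List.isEmpty_nil]
        rw [gg, if_neg (by simp [hrg])]
        rw [if_neg (by simp)]
        exact ih1
      · intro cur hcur
        have hcure : cur.isEmpty = false := by simpa [List.isEmpty_iff] using hcur
        rw [Wd]
        simp only [hspb, hcure, if_true, Bool.false_eq_true, if_false]
        rw [gg, if_neg (by simp [hrg])]
        rw [if_pos (by simp)]
        cases hW : Wd [] r with
        | nil =>
          have hg : gg false r = [] := by rw [← ih1, hW, PySem.Chars.join_nil]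
          rw [hg, PySem.Chars.join_singleton]
          simp
        | cons x t =>
          have hx : x ≠ [] := Wd_mem_ne_nil r [] x (by rw [hW]; simp)
          have hg : gg false r = PySem.Chars.join [' '] (x :: t) := by rw [← ih1, hW]
          have hgne : gg false r ≠ [] := by
            rw [hg]
            cases t with
            | nil => rw [PySem.Chars.join_singleton]; exact hx
            | cons y u => rw [PySem.Chars.join_cons_cons]; simp
          rw [PySem.Chars.join_cons_cons, ← hW, ih1]
          cases hg2 : gg false r with
          | nil => exact absurd hg2 hgne
          | cons a b => simp
    · have hspb : PySem.Chars.isspace c = false := by rw [hc.1]; simp [hsp]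
      have hrg : regC c = true := by rw [hc.2]; simp [hsp]
      constructor
      · rw [Wd]
        simp only [hspb, Bool.false_eq_true, if_false]
        rw [ih2 [c] (by simp)]
        rw [gg, if_pos (by simp [hrg])]
        simp
      · intro cur hcur
        rw [Wd]
        simp only [hspb, Bool.false_eq_true, if_false]
        rw [ih2 (c :: cur) (by simp)]
        rw [gg, if_pos (by simp [hrg])]
        simp

lemma pyGet_neg_one (m : List Char) (h : m ≠ []) : PySem.List.pyGet? m (-1) = m.getLast? := by
  have h1 : 1 ≤ m.length := List.length_pos_iff.mpr h
  simp [PySem.List.pyGet?, PySem.List.pyIdx?, h1, List.getLast?_eq_getElem?]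


lemma charEq (c d : Char) (h : c.toNat = d.toNat) : c = d := Char.ext (UInt32.toNat_inj.mp h)

lemma dom_char_facts (c : Char) (hdom : pvDomChar c = true) (hns : c ∉ ['\n', '\r', '\t', '\\']) :
    PySem.Chars.isspace c = (c == ' ') ∧ regC c = !(c == ' ') := by
  have hcontains : (['\n', '\r', '\t', '\\'].contains c) = false := by
    cases hb : ['\n', '\r', '\t', '\\'].contains c
    · rfl
    · exact absurd (by simpa using hb) hns
  by_cases hc : c = ' '
  · subst hc; exact ⟨by decide, by decide⟩
  · have hns' : ¬(c = '\n' ∨ c = '\x0d' ∨ c = '\t' ∨ c = '\\') := by simpa using hns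
    have hbeq : (c == ' ') = false := by simpa using hc
    have hn32 : c.toNat ≠ 32 := fun h => hc (charEq c ' ' (by rw [h]; decide))
    have h9 : c.toNat ≠ 9 := fun h => hns' (Or.inr (Or.inr (Or.inl (charEq c '\t' (by rw [h]; decide)))))
    have h10 : c.toNat ≠ 10 := fun h => hns' (Or.inl (charEq c '\n' (by rw [h]; decide)))
    have h13 : c.toNat ≠ 13 := fun h => hns' (Or.inr (Or.inl (charEq c '\x0d' (by rw [h]; decide))))
    have hdc : (32 ≤ c.toNat ∧ c.toNat ≤ 126) ∨ c.toNat = 9 ∨ c.toNat = 10 ∨ c.toNat = 13 := by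
      simp only [pvDomChar, Bool.or_eq_true, Bool.and_eq_true, decide_eq_true_eq,
        beq_iff_eq] at hdom
      tauto
    constructor
    · rw [hbeq]
      simp only [PySem.Chars.isspace]
      simp only [Bool.or_eq_false_iff, Bool.and_eq_false_iff, decide_eq_false_iff_not]
      omega
    · rw [hbeq]
      rw [regC, hbeq, hcontains]; rfl


-- ===== VERDICT (by name: the statement is the Claim_ definition above) =====
theorem get_clean_string_spec : Claim_equal_get_clean_string := by
  intro s hdom hpre
  unfold Spec_get_clean_string
  by_cases hse : s = ""
  · subst hse; rfl
  · have hbe : (s == "") = false := by simpa using hse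
    obtain ⟨c0, hc0mem, hc0p⟩ :
        ∃ c ∈ s.toList, (!(c == ' ') && !(['\n', '\r', '\t', '\\'].contains c)) = true := by
      rcases hpre with h | h
      · exact absurd h hse
      · exact List.any_eq_true.mp h
    have hdomc : ∀ c ∈ s.toList, pvDomChar c = true := by
      intro c hc
      have h := hdom
      unfold Dom_get_clean_string pvDomStr at h
      exact List.all_eq_true.mp h c hc
    have hc0reg : regC c0 = true := by rw [regC, Bool.not_or]; exact hc0p
    have hhne : hh false s.toList ≠ [] := hh_ne_nil false s.toList ⟨c0, hc0mem, hc0reg⟩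
    have hst : (loopA s).1 = hh false s.toList := by
      rw [loopA]
      exact (invA (s.toList.length : Int) s.toList 0 (by simp)).2.2
    -- A's value is the trimmed eager cleaned string
    have hA : get_clean_string s = some (String.ofList (trimEnd (hh false s.toList))) := by
      rw [get_clean_string, if_neg (by simp [hbe])]
      rw [hst, pyGet_neg_one _ hhne]
      cases hlast : (hh false s.toList).getLast? with
      | none => exact absurd (List.getLast?_eq_none_iff.mp hlast) hhne
      | some c =>
        by_cases hc : c = ' '
        · subst hc
          have hsl : PySem.List.slice (hh false s.toList) none (some (-1))
              = (hh false s.toList).dropLast := by simp [pysem]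
          rw [trimEnd, if_pos hlast]
          simp [hsl]
        · simp only [if_neg hc]
          rw [trimEnd, if_neg (by rw [hlast]; simpa using hc)]
    -- B's value is the lazily collapsed kept characters
    have hm : ∀ c ∈ s.toList.filter (fun c => !(['\n', '\r', '\t', '\\'].contains c)),
        (PySem.Chars.isspace c = (c == ' ')) ∧ (regC c = !(c == ' ')) := by
      intro c hcmem
      obtain ⟨hcl, hcf⟩ := List.mem_filter.mp hcmem
      refine dom_char_facts c (hdomc c hcl) ?_
      intro habs
      have hcont : (['\n', '\r', '\t', '\\'].contains c) = true := by simpa using habs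
      rw [hcont] at hcf; exact absurd hcf (by decide)
    have hB : get_clean_string_alt s
        = some (String.ofList (gg false (s.toList.filter (fun c => !(['\n', '\r', '\t', '\\'].contains c))))) := by
      rw [get_clean_string_alt, if_neg (by simp [hbe])]
      refine congrArg some (String.toList_inj.mp ?_)
      rw [PySem.Str.toList_join, PySem.Str.split₀_map_toList]
      have hkt : (keptB s).toList = s.toList.filter (fun c => !(['\n', '\r', '\t', '\\'].contains c)) := by
        rw [keptB]; simp
      rw [hkt]
      have hgo : PySem.Chars.split₀ (s.toList.filter (fun c => !(['\n', '\r', '\t', '\\'].contains c)))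
          = Wd [] (s.toList.filter (fun c => !(['\n', '\r', '\t', '\\'].contains c))) := by
        simpa [PySem.Chars.split₀] using split₀_go_eq_Wd (s.toList.filter (fun c => !(['\n', '\r', '\t', '\\'].contains c))) [] []
      rw [hgo]
      have hsep : (" " : String).toList = [' '] := by decide
      rw [hsep, (join_Wd _ hm).1]
      simp
    rw [hA, hB]
    refine congrArg some (congrArg String.ofList ?_)
    rw [← trimEnd_ee false, ee_filter, trimEnd_hh_ee]
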